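-- pv_equiv track=rewrite | github.com/tpaz1/bookverse-infra | libraries/bookverse-devops/scripts/apptrust_rollback.py | pick_next_latest
-- ===== SOURCE A (Python) =====
-- from typing import Any, Dict, List, Optional, Tuple
--
-- TRUSTED = "TRUSTED_RELEASE"
--
-- QUARANTINE_TAG = "quarantine"
--
-- def pick_next_latest(sorted_prod_versions: List[Dict[str, Any]], exclude_version: str) -> Optional[Dict[str, Any]]:
--
--
--     dup: Dict[str, List[Dict[str, Any]]] = {}
--     for v in sorted_prod_versions:
--         if v["version"] == exclude_version:
--             continue
--         if v.get("tag", "") == QUARANTINE_TAG: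
--             continue
--         dup.setdefault(v["version"], []).append(v)
--     if not dup:
--         return None
--     seen: set[str] = set()
--     ordered: List[str] = []
--     for v in sorted_prod_versions:
--         vv = v["version"]
--         if vv == exclude_version:
--             continue
--         if vv in dup and vv not in seen:
--             ordered.append(vv)
--             seen.add(vv)
--     for ver in ordered:
--         cands = dup[ver]
--         trusted = [c for c in cands if c.get("release_status") == TRUSTED]
--         if trusted:
--             return trusted[0]
--         return cands[0]
--     return None
-- ===== SOURCE B (Python) =====
-- from typing import Any, Dict, List, Optional
--
-- TRUSTED = "TRUSTED_RELEASE"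
--
-- QUARANTINE_TAG = "quarantine"
--
-- def pick_next_latest(sorted_prod_versions: List[Dict[str, Any]], exclude_version: str) -> Optional[Dict[str, Any]]:
--     for v in sorted_prod_versions:
--         ver = v["version"]
--         if ver == exclude_version:
--             continue
--         cands = [c for c in sorted_prod_versions
--                  if c["version"] == ver and c.get("tag", "") != QUARANTINE_TAG]
--         if not cands:
--             continue
--         for c in cands:
--             if c.get("release_status") == TRUSTED:
--                 return c
--         return cands[0]
--     return None
-- ===== Notes on version B (the rewrite author's own statement) =====
-- stated objective: simpler
-- what changed: Replaced A's three-phase dict-grouping (build a version->candidates dict, rebuild an ordered dedup list of versions, then consume only its first group) by a direct single search: find the first non-excluded entry whose version has a non-quarantined candidate, then pick the first trusted (else first) candidate among that version's entries.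
import Mathlib
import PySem

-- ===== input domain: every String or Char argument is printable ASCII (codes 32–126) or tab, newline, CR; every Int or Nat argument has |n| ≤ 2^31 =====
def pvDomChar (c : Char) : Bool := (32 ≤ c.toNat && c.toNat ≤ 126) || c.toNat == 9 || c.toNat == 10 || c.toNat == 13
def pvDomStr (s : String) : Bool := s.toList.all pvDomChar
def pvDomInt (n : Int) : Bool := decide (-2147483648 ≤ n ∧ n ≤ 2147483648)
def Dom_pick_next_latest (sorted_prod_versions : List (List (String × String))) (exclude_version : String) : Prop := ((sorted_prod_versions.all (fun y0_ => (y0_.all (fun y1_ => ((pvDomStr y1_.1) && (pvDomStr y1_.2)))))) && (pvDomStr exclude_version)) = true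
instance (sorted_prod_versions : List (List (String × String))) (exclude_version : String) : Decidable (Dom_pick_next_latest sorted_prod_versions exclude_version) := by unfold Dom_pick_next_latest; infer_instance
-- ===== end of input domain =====

-- B replaces A's dict-grouping + ordered-dedup-list machinery by a direct search for the first usable
-- version followed by one focused scan over that version's candidates (objective: simpler).

-- ===== PORT A =====
-- entry lookup: Python dict -> association list, lookup = first match; pvEntryGetD e k d = e.get(k, d)
def pvEntryGetD (e : List (String × String)) (k d : String) : String :=
  match e.find? (fun p => p.1 == k) with
  | some p => p.2
  | none => d

-- v["version"]; exact under Pre_ (every entry carries a "version" key); where the key is missing Python raises KeyError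
def pvVer (e : List (String × String)) : String := pvEntryGetD e "version" ""

-- v.get("tag", "") == "quarantine"
def pvQuar (e : List (String × String)) : Bool := pvEntryGetD e "tag" "" == "quarantine"

-- v.get("release_status") == "TRUSTED_RELEASE"; Python's default here is None, and None == TRUSTED is
-- False just as "" == TRUSTED is False ("" can also occur as a stored value, equally ≠ TRUSTED), so the "" default is exact
def pvTrusted (e : List (String × String)) : Bool := pvEntryGetD e "release_status" "" == "TRUSTED_RELEASE"

def pick_next_latest (sorted_prod_versions : List (List (String × String))) (exclude_version : String) : Option (List (String × String)) :=
  -- dup.setdefault(v["version"], []).append(v)  =  modify key [] (· ++ [v])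
  let dup : PySem.Dict String (List (List (String × String))) :=
    sorted_prod_versions.foldl (fun d v =>
      if pvVer v == exclude_version then d
      else if pvQuar v then d
      else d.modify (pvVer v) [] (fun g => g ++ [v])) PySem.Dict.empty
  if dup.items.isEmpty then none
  else
    let st := sorted_prod_versions.foldl
      (fun (st : PySem.Set String × List String) v =>
        if pvVer v == exclude_version then st
        else if dup.contains (pvVer v) && !(st.1.contains (pvVer v)) then
          (PySem.Set.add st.1 (pvVer v), st.2 ++ [pvVer v])
        else st)
      (PySem.Set.empty, [])
    match st.2 with
    | [] => none
    | ver :: _ =>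
      let cands := dup.getD ver []
      match cands.filter pvTrusted with
      | t :: _ => some t
      | [] => cands.head?   -- cands[0]; cands is never empty here (every dup group was built by appends)

-- ===== PORT B =====
def pickNextGo (sorted_prod_versions : List (List (String × String))) (exclude_version : String) : List (List (String × String)) → Option (List (String × String))
  | [] => none
  | v :: rest =>
    if pvVer v == exclude_version then pickNextGo sorted_prod_versions exclude_version rest
    else
      let cands := sorted_prod_versions.filter (fun c => pvVer c == pvVer v && !pvQuar c)
      if cands.isEmpty then pickNextGo sorted_prod_versions exclude_version rest
      else
        match cands.find? pvTrusted with
        | some t => some t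
        | none => cands.head?

def pick_next_latest_alt (sorted_prod_versions : List (List (String × String))) (exclude_version : String) : Option (List (String × String)) :=
  pickNextGo sorted_prod_versions exclude_version sorted_prod_versions

-- ===== PRECONDITION & SPEC =====
-- Pre_ excludes exactly the inputs on which Python A raises KeyError: an entry without a "version" key
-- (B raises there too).
def Pre_pick_next_latest (sorted_prod_versions : List (List (String × String))) (exclude_version : String) : Prop :=
  ∀ e ∈ sorted_prod_versions, e.any (fun p => p.1 == "version") = true
instance (sorted_prod_versions : List (List (String × String))) (exclude_version : String) : Decidable (Pre_pick_next_latest sorted_prod_versions exclude_version) := by unfold Pre_pick_next_latest; infer_instance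

def pvWitness_pick_next_latest : (List (List (String × String))) × String :=
  ([[("version", "1.0"), ("release_status", "TRUSTED_RELEASE")], [("version", "2.0"), ("tag", "quarantine")]], "9.9")

def Spec_pick_next_latest (sorted_prod_versions : List (List (String × String))) (exclude_version : String) (out : Option (List (String × String))) : Prop := out = pick_next_latest_alt sorted_prod_versions exclude_version
instance (sorted_prod_versions : List (List (String × String))) (exclude_version : String) (out : Option (List (String × String))) : Decidable (Spec_pick_next_latest sorted_prod_versions exclude_version out) := by unfold Spec_pick_next_latest; infer_instance

-- ===== CLAIM (what is proved, stated in full; the proofs are below) =====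
def Claim_equal_pick_next_latest : Prop := ∀ (sorted_prod_versions : List (List (String × String))) (exclude_version : String), Dom_pick_next_latest sorted_prod_versions exclude_version → Pre_pick_next_latest sorted_prod_versions exclude_version → Spec_pick_next_latest sorted_prod_versions exclude_version (pick_next_latest sorted_prod_versions exclude_version)

-- ===== LEMMAS AND PROOFS =====

-- proof-only abbreviations
def pvKeep (ex : String) (v : List (String × String)) : Bool := !(pvVer v == ex) && !(pvQuar v)
def pvCands (svs : List (List (String × String))) (ver : String) : List (List (String × String)) :=
  svs.filter (fun c => pvVer c == ver && !pvQuar c)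
def pvGood (svs : List (List (String × String))) (ex : String) (v : List (String × String)) : Bool :=
  !(pvVer v == ex) && !(pvCands svs (pvVer v)).isEmpty

theorem pv_find?_congr {α : Type} (l : List α) (p q : α → Bool) (h : ∀ x ∈ l, p x = q x) :
    l.find? p = l.find? q := by
  induction l with
  | nil => rfl
  | cons a t ih =>
    simp only [List.find?]; rw [h a (by simp)]
    split
    · rfl
    · exact ih (fun x hx => h x (by simp [hx]))

theorem pv_any_congr {α : Type} (l : List α) (p q : α → Bool) (h : ∀ x ∈ l, p x = q x) :
    l.any p = l.any q := by
  rw [Bool.eq_iff_iff]; simp only [List.any_eq_true]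
  exact ⟨fun ⟨x, hx, hp⟩ => ⟨x, hx, h x hx ▸ hp⟩, fun ⟨x, hx, hp⟩ => ⟨x, hx, (h x hx).symm ▸ hp⟩⟩

theorem pv_isEmpty_filter {α : Type} (l : List α) (p : α → Bool) :
    (l.filter p).isEmpty = !l.any p := by
  rw [Bool.eq_iff_iff]; simp [List.isEmpty_iff, List.filter_eq_nil_iff]

-- B's loop as a find?
theorem pickNextGo_eq (svs : List (List (String × String))) (ex : String) (rem : List (List (String × String))) :
    pickNextGo svs ex rem =
      match rem.find? (pvGood svs ex) with
      | none => none
      | some v =>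
        match (pvCands svs (pvVer v)).find? pvTrusted with
        | some t => some t
        | none => (pvCands svs (pvVer v)).head? := by
  induction rem with
  | nil => rfl
  | cons v rest ih =>
    simp only [pickNextGo, List.find?]
    by_cases h1 : (pvVer v == ex) = true
    · simp [pvGood, h1, ih]
    · rw [Bool.not_eq_true] at h1
      by_cases h2 : (pvCands svs (pvVer v)).isEmpty = true
      · simp only [h1, pvCands] at h2 ⊢
        simp [pvGood, pvCands, h1, h2, ih]
      · rw [Bool.not_eq_true] at h2
        simp only [h1, pvCands] at h2 ⊢
        simp [pvGood, pvCands, h1, h2]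

-- A's grouping fold, rewritten over the kept entries
theorem dup_fold_eq (ex : String) (svs : List (List (String × String)))
    (d : PySem.Dict String (List (List (String × String)))) :
    svs.foldl (fun d v =>
      if pvVer v == ex then d
      else if pvQuar v then d
      else d.modify (pvVer v) [] (fun g => g ++ [v])) d
    = ((svs.filter (pvKeep ex)).map (fun v => (pvVer v, v))).foldl
        (fun d p => d.modify p.1 [] (fun g => g ++ [p.2])) d := by
  induction svs generalizing d with
  | nil => rfl
  | cons v rest ih =>
    simp only [List.foldl_cons]
    by_cases h1 : (pvVer v == ex) = true
    · have hk : pvKeep ex v = false := by simp [pvKeep, h1]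
      rw [if_pos h1, List.filter_cons_of_neg (by rw [hk]; exact Bool.false_ne_true)]
      exact ih d
    · rw [Bool.not_eq_true] at h1
      rw [if_neg (by rw [h1]; exact Bool.false_ne_true)]
      by_cases h2 : pvQuar v = true
      · have hk : pvKeep ex v = false := by simp [pvKeep, h2]
        rw [if_pos h2, List.filter_cons_of_neg (by rw [hk]; exact Bool.false_ne_true)]
        exact ih d
      · rw [Bool.not_eq_true] at h2
        have hk : pvKeep ex v = true := by simp [pvKeep, h1, h2]
        rw [if_neg (by rw [h2]; exact Bool.false_ne_true), List.filter_cons_of_pos hk]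
        rw [List.map_cons, List.foldl_cons]
        exact ih _

theorem dup_getD (ex : String) (svs : List (List (String × String))) (k : String) :
    (svs.foldl (fun d v =>
      if pvVer v == ex then d
      else if pvQuar v then d
      else d.modify (pvVer v) [] (fun g => g ++ [v])) PySem.Dict.empty).getD k []
    = svs.filter (fun v => pvKeep ex v && (pvVer v == k)) := by
  rw [dup_fold_eq, PySem.Dict.getD_foldl_modify_append]
  simp only [PySem.Dict.getD_empty, List.nil_append]
  rw [List.filter_map, List.map_map]
  rw [List.filter_filter]
  simp only [Function.comp]
  rw [show (fun v => pvKeep ex v && (pvVer v == k)) = fun v => ((pvVer v, v).1 == k) && pvKeep ex v from ?_]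
  · exact (List.map_id _)
  · funext v; exact Bool.and_comm _ _

theorem dup_contains (ex : String) (svs : List (List (String × String))) (k : String)
    (d : PySem.Dict String (List (List (String × String)))) :
    (svs.foldl (fun d v =>
      if pvVer v == ex then d
      else if pvQuar v then d
      else d.modify (pvVer v) [] (fun g => g ++ [v])) d).contains k
    = (d.contains k || svs.any (fun v => pvKeep ex v && (pvVer v == k))) := by
  induction svs generalizing d with
  | nil => simp
  | cons v rest ih =>
    simp only [List.foldl_cons, List.any_cons]
    by_cases h1 : (pvVer v == ex) = true
    · have hk : (pvKeep ex v && (pvVer v == k)) = false := by simp [pvKeep, h1]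
      rw [if_pos h1, ih d, hk, Bool.false_or]
    · rw [Bool.not_eq_true] at h1
      rw [if_neg (by rw [h1]; exact Bool.false_ne_true)]
      by_cases h2 : pvQuar v = true
      · have hk : (pvKeep ex v && (pvVer v == k)) = false := by simp [pvKeep, h2]
        rw [if_pos h2, ih d, hk, Bool.false_or]
      · rw [Bool.not_eq_true] at h2
        have hk : (pvKeep ex v && (pvVer v == k)) = (k == pvVer v) := by
          simp only [pvKeep, h1, h2, Bool.not_false, Bool.and_true, Bool.true_and]
          rw [Bool.eq_iff_iff, beq_iff_eq, beq_iff_eq]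
          exact eq_comm
        rw [if_neg (by rw [h2]; exact Bool.false_ne_true), ih, PySem.Dict.contains_modify, hk]
        cases hkk : (k == pvVer v) <;> cases hd : d.contains k <;>
          simp only [Bool.false_or, Bool.true_or, Bool.or_false, Bool.or_true]

theorem dup_items_empty (ex : String) (svs : List (List (String × String))) :
    ((svs.foldl (fun d v =>
      if pvVer v == ex then d
      else if pvQuar v then d
      else d.modify (pvVer v) [] (fun g => g ++ [v])) PySem.Dict.empty).items = []
    ↔ svs.filter (pvKeep ex) = []) := by
  rw [dup_fold_eq]
  constructor
  · intro h
    by_contra hne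
    rcases List.exists_mem_of_ne_nil _ hne with ⟨c, hc⟩
    have hkeys : (((svs.filter (pvKeep ex)).map (fun v => (pvVer v, v))).foldl
        (fun d p => d.modify p.1 [] (fun g => g ++ [p.2])) PySem.Dict.empty).keys = [] := by
      simp only [PySem.Dict.keys, h, List.map_nil]
    have hk := PySem.Dict.keys_foldl_modify_key
      ((svs.filter (pvKeep ex)).map (fun v => (pvVer v, v))) Prod.fst
      ([] : List (List (String × String)))
      (fun _ p => fun g => g ++ [p.2]) PySem.Dict.empty
    rw [PySem.Dict.keys_empty, PySem.Set.update_nil_left] at hk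
    have hnil : PySem.Set.ofList
        (((svs.filter (pvKeep ex)).map (fun v => (pvVer v, v))).map Prod.fst) = [] :=
      hk.symm.trans hkeys
    have hmem : pvVer c ∈ ((svs.filter (pvKeep ex)).map (fun v => (pvVer v, v))).map Prod.fst := by
      rw [List.map_map]
      exact List.mem_map.2 ⟨c, hc, rfl⟩
    have : pvVer c ∈ PySem.Set.ofList
        (((svs.filter (pvKeep ex)).map (fun v => (pvVer v, v))).map Prod.fst) :=
      (PySem.Set.mem_ofList _ _).2 hmem
    rw [hnil] at this
    exact (List.not_mem_nil) this
  · intro h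
    rw [h]; rfl

-- the ordered-list fold only ever appends
theorem ordered_prefix (ex : String) (dup : PySem.Dict String (List (List (String × String))))
    (rem : List (List (String × String))) (s : PySem.Set String) (ord : List String) :
    ∃ t, (rem.foldl
      (fun (st : PySem.Set String × List String) v =>
        if pvVer v == ex then st
        else if dup.contains (pvVer v) && !(st.1.contains (pvVer v)) then
          (PySem.Set.add st.1 (pvVer v), st.2 ++ [pvVer v])
        else st)
      (s, ord)).2 = ord ++ t := by
  induction rem generalizing s ord with
  | nil => exact ⟨[], by simp⟩
  | cons v rest ih =>
    simp only [List.foldl_cons]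
    by_cases h1 : (pvVer v == ex) = true
    · rw [if_pos h1]; exact ih s ord
    · rw [Bool.not_eq_true] at h1
      rw [if_neg (by rw [h1]; exact Bool.false_ne_true)]
      by_cases h2 : (dup.contains (pvVer v) && !(s.contains (pvVer v))) = true
      · rw [if_pos h2]
        rcases ih (PySem.Set.add s (pvVer v)) (ord ++ [pvVer v]) with ⟨t, ht⟩
        refine ⟨pvVer v :: t, ?_⟩
        rw [ht, List.append_assoc]
        rfl
      · rw [Bool.not_eq_true] at h2
        rw [if_neg (by rw [h2]; exact Bool.false_ne_true)]
        exact ih s ord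

theorem ordered_head (ex : String) (dup : PySem.Dict String (List (List (String × String))))
    (rem : List (List (String × String))) :
    ((rem.foldl
      (fun (st : PySem.Set String × List String) v =>
        if pvVer v == ex then st
        else if dup.contains (pvVer v) && !(st.1.contains (pvVer v)) then
          (PySem.Set.add st.1 (pvVer v), st.2 ++ [pvVer v])
        else st)
      (PySem.Set.empty, [])).2).head?
    = (rem.find? (fun v => !(pvVer v == ex) && dup.contains (pvVer v))).map pvVer := by
  induction rem with
  | nil => rfl
  | cons v rest ih =>
    simp only [List.foldl_cons]
    by_cases h1 : (pvVer v == ex) = true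
    · have hp : (!(pvVer v == ex) && dup.contains (pvVer v)) = false := by simp [h1]
      rw [if_pos h1, List.find?_cons_of_neg (by rw [hp]; exact Bool.false_ne_true)]
      exact ih
    · rw [Bool.not_eq_true] at h1
      by_cases h2 : dup.contains (pvVer v) = true
      · have hp : (fun v => !(pvVer v == ex) && dup.contains (pvVer v)) v = true := by
          simp [h1, h2]
        have hcond : (dup.contains (pvVer v)
            && !((PySem.Set.empty : PySem.Set String).contains (pvVer v))) = true := by
          rw [h2]; rfl
        have hfr : List.find? (fun v => !(pvVer v == ex) && dup.contains (pvVer v)) (v :: rest)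
            = some v := List.find?_cons_of_pos hp
        rw [if_neg (by rw [h1]; exact Bool.false_ne_true), if_pos hcond, hfr]
        rcases ordered_prefix ex dup rest (PySem.Set.add PySem.Set.empty (pvVer v)) [pvVer v]
          with ⟨t, ht⟩
        rw [show ((PySem.Set.empty : PySem.Set String), ([] : List String)).2 ++ [pvVer v]
              = [pvVer v] from rfl] at *
        rw [ht]
        rfl
      · rw [Bool.not_eq_true] at h2
        have hp : (!(pvVer v == ex) && dup.contains (pvVer v)) = false := by simp [h2]
        have hcond : (dup.contains (pvVer v)
            && !((PySem.Set.empty : PySem.Set String).contains (pvVer v))) = false := by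
          rw [h2]; rfl
        rw [if_neg (by rw [h1]; exact Bool.false_ne_true),
          if_neg (by rw [hcond]; exact Bool.false_ne_true),
          List.find?_cons_of_neg (by rw [hp]; exact Bool.false_ne_true)]
        exact ih

-- named pieces of A's body (proof-only)
def pvDup (svs : List (List (String × String))) (ex : String) :
    PySem.Dict String (List (List (String × String))) :=
  svs.foldl (fun d v =>
    if pvVer v == ex then d
    else if pvQuar v then d
    else d.modify (pvVer v) [] (fun g => g ++ [v])) PySem.Dict.empty

def pvOrd (svs : List (List (String × String))) (ex : String) : List String :=
  (svs.foldl
    (fun (st : PySem.Set String × List String) v =>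
      if pvVer v == ex then st
      else if (pvDup svs ex).contains (pvVer v) && !(st.1.contains (pvVer v)) then
        (PySem.Set.add st.1 (pvVer v), st.2 ++ [pvVer v])
      else st)
    (PySem.Set.empty, [])).2

theorem A_unfold (svs : List (List (String × String))) (ex : String) :
    pick_next_latest svs ex =
      if (pvDup svs ex).items.isEmpty then none
      else
        match pvOrd svs ex with
        | [] => none
        | ver :: _ =>
          match ((pvDup svs ex).getD ver []).filter pvTrusted with
          | t :: _ => some t
          | [] => ((pvDup svs ex).getD ver []).head? := rfl

theorem dup_getD' (svs : List (List (String × String))) (ex k : String) :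
    (pvDup svs ex).getD k [] = svs.filter (fun v => pvKeep ex v && (pvVer v == k)) :=
  dup_getD ex svs k

theorem dup_contains' (svs : List (List (String × String))) (ex k : String) :
    (pvDup svs ex).contains k = svs.any (fun v => pvKeep ex v && (pvVer v == k)) := by
  unfold pvDup
  rw [dup_contains, PySem.Dict.contains_empty, Bool.false_or]

theorem dup_items_empty' (svs : List (List (String × String))) (ex : String) :
    ((pvDup svs ex).items = [] ↔ svs.filter (pvKeep ex) = []) :=
  dup_items_empty ex svs

theorem ord_head (svs : List (List (String × String))) (ex : String) :
    (pvOrd svs ex).head?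
      = (svs.find? (fun v => !(pvVer v == ex) && (pvDup svs ex).contains (pvVer v))).map pvVer :=
  ordered_head ex (pvDup svs ex) svs

-- A's first-loop predicate coincides with B's
theorem good_eq (svs : List (List (String × String))) (ex : String)
    (v : List (String × String)) :
    (!(pvVer v == ex) && (pvDup svs ex).contains (pvVer v)) = pvGood svs ex v := by
  rw [dup_contains']
  unfold pvGood pvCands
  by_cases h1 : (pvVer v == ex) = true
  · rw [h1]; rfl
  · rw [Bool.not_eq_true] at h1
    rw [h1, pv_isEmpty_filter, Bool.not_not]
    have hpt : ∀ c ∈ svs,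
        (pvKeep ex c && (pvVer c == pvVer v)) = ((pvVer c == pvVer v) && !pvQuar c) := by
      intro c _
      by_cases hc : (pvVer c == pvVer v) = true
      · have hce : pvVer c = pvVer v := by simpa using hc
        have h2 : (pvVer c == ex) = false := by rw [hce]; exact h1
        simp [pvKeep, hc, h2]
      · rw [Bool.not_eq_true] at hc
        simp [pvKeep, hc]
    rw [pv_any_congr svs _ _ hpt]

-- ===== VERDICT (by name: the statement is the Claim_ definition above) =====
theorem pick_next_latest_spec : Claim_equal_pick_next_latest := by
  intro svs ex _dom _pre
  unfold Spec_pick_next_latest pick_next_latest_alt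
  rw [A_unfold, pickNextGo_eq]
  have hfind : svs.find? (fun v => !(pvVer v == ex) && (pvDup svs ex).contains (pvVer v))
      = svs.find? (pvGood svs ex) :=
    pv_find?_congr _ _ _ (fun v _ => good_eq svs ex v)
  cases h : svs.find? (pvGood svs ex) with
  | none =>
    have hempty : (pvDup svs ex).items.isEmpty = true := by
      rw [List.isEmpty_iff, dup_items_empty']
      by_contra hne
      rcases List.exists_mem_of_ne_nil _ hne with ⟨c, hc⟩
      rw [List.mem_filter] at hc
      have h1 : (pvVer c == ex) = false := by
        have hkp := hc.2
        revert hkp; unfold pvKeep; cases (pvVer c == ex) <;> simp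
      have hq : pvQuar c = false := by
        have hkp := hc.2
        revert hkp; unfold pvKeep; cases pvQuar c <;> simp
      have hgood : pvGood svs ex c = true := by
        unfold pvGood pvCands
        rw [h1, pv_isEmpty_filter, Bool.not_not]
        simp only [Bool.not_false, Bool.true_and]
        rw [List.any_eq_true]
        exact ⟨c, hc.1, by simp [hq]⟩
      exact (List.find?_eq_none.1 h c hc.1) hgood
    rw [if_pos hempty]
  | some v =>
    have hvp : pvGood svs ex v = true := List.find?_some h
    unfold pvGood at hvp
    have h1 : (pvVer v == ex) = false := by
      revert hvp; cases (pvVer v == ex) <;> simp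
    have hcne : (pvCands svs (pvVer v)).isEmpty = false := by
      revert hvp; cases (pvCands svs (pvVer v)).isEmpty <;> simp
    have hne : (pvDup svs ex).items.isEmpty = false := by
      by_contra habs
      rw [Bool.not_eq_false, List.isEmpty_iff, dup_items_empty'] at habs
      have hany : (svs.any fun c => (pvVer c == pvVer v) && !pvQuar c) = true := by
        unfold pvCands at hcne
        rw [pv_isEmpty_filter] at hcne
        revert hcne
        cases svs.any fun c => (pvVer c == pvVer v) && !pvQuar c <;> simp
      rcases List.any_eq_true.1 hany with ⟨c, hcmem, hcprop⟩
      have hcb : (pvVer c == pvVer v) = true := by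
        revert hcprop; cases (pvVer c == pvVer v) <;> simp
      have hcq : pvQuar c = false := by
        revert hcprop; cases pvQuar c <;> simp
      have hcv : pvVer c = pvVer v := by simpa using hcb
      have hkeep : pvKeep ex c = true := by
        unfold pvKeep
        rw [show (pvVer c == ex) = false from by rw [hcv]; exact h1, hcq]
        rfl
      have : c ∈ svs.filter (pvKeep ex) := List.mem_filter.2 ⟨hcmem, hkeep⟩
      rw [habs] at this
      exact (List.not_mem_nil) this
    rw [if_neg (by rw [hne]; exact Bool.false_ne_true)]
    have hh : (pvOrd svs ex).head? = some (pvVer v) := by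
      rw [ord_head, hfind, h]; rfl
    obtain ⟨t, hrest⟩ : ∃ t, pvOrd svs ex = pvVer v :: t := by
      cases ho : pvOrd svs ex with
      | nil => rw [ho] at hh; exact absurd hh (by simp)
      | cons a t =>
        rw [ho] at hh
        have ha : a = pvVer v := by simpa using hh
        exact ⟨t, by rw [ha]⟩
    rw [hrest]
    have hcand : (pvDup svs ex).getD (pvVer v) [] = pvCands svs (pvVer v) := by
      rw [dup_getD']
      unfold pvCands
      apply List.filter_congr
      intro c _
      by_cases hc : (pvVer c == pvVer v) = true
      · have hce : pvVer c = pvVer v := by simpa using hc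
        have h2 : (pvVer c == ex) = false := by rw [hce]; exact h1
        simp [pvKeep, hc, h2]
      · rw [Bool.not_eq_true] at hc
        simp [pvKeep, hc]
    have hgoal : (match ((pvDup svs ex).getD (pvVer v) []).filter pvTrusted with
        | t :: _ => some t
        | [] => ((pvDup svs ex).getD (pvVer v) []).head?)
      = (match (pvCands svs (pvVer v)).find? pvTrusted with
        | some t => some t
        | none => (pvCands svs (pvVer v)).head?) := by
      rw [hcand, ← List.head?_filter]
      cases hf : (pvCands svs (pvVer v)).filter pvTrusted <;> rfl
    exact hgoal
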